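-- pv_equiv track=rewrite | github.com/lozh/python-aoc | 2016/13/aoc-13-2.py | solve
-- ===== SOURCE A (Python) =====
-- def is_wall(pos, key):
--     x, y = pos
--     v = x * x + 3 * x + 2 * x * y + y + y * y + key
--     return bin(v).count("1") % 2 == 1
--
-- def neighbours(pos):
--     x, y = pos
--     yield x + 1, y
--     yield x, y + 1
--     if x > 0:
--         yield x - 1, y
--     if y > 0:
--         yield x, y - 1
--
-- def solve(pos, moves, key):
--     visited = set()
--     starts = [pos]
--     for _ in range(moves + 1):
--         new_starts = []
--         for n in starts:
--             if not is_wall(n, key):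
--                 if not n in visited:
--                     visited.add(n)
--                     for p in neighbours(n):
--                         new_starts.append(p)
--         starts = new_starts
--     return len(visited)
-- ===== SOURCE B (Python) =====
-- def is_wall(pos, key):
--     x, y = pos
--     v = x * x + 3 * x + 2 * x * y + y + y * y + key
--     return bin(v).count("1") % 2 == 1
--
--
-- def neighbours(pos):
--     x, y = pos
--     yield x + 1, y
--     yield x, y + 1
--     if x > 0:
--         yield x - 1, y
--     if y > 0:
--         yield x, y - 1
--
--
-- def solve(pos, moves, key):
--     # depth-first search with distance relaxation: dist maps each open cell to the
--     # best path length found so far; a cell is re-expanded whenever it improves.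
--     if moves < 0:
--         return 0
--     dist = {}
--     stack = [(pos, 0)]
--     while stack:
--         c, d = stack.pop()
--         if is_wall(c, key):
--             continue
--         e = dist.get(c)
--         if e is not None and e <= d:
--             continue
--         dist[c] = d
--         if d < moves:
--             for p in neighbours(c):
--                 stack.append((p, d + 1))
--     return len(dist)
-- ===== Notes on version B (the rewrite author's own statement) =====
-- stated objective: alternative
-- what changed: Replaced A's level-synchronous breadth-first search (visited set + per-level frontier lists, always running moves+1 generations) with a depth-first search over an explicit LIFO stack that maintains a distance map and re-expands a cell whenever a shorter path to it is found (Bellman-Ford-style relaxation), returning the number of keys of the distance map.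
import Mathlib
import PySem

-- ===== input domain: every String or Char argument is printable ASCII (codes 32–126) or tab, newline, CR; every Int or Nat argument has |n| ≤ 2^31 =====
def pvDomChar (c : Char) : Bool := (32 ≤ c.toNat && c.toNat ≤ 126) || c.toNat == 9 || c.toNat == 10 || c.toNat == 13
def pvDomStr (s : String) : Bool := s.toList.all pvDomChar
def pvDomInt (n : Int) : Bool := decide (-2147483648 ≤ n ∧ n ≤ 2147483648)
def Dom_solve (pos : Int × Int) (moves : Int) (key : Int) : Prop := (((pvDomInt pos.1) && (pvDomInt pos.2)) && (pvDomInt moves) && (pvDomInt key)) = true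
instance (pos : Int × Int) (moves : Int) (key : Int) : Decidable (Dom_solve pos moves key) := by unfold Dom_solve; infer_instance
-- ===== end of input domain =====

-- B replaces A's level-synchronous breadth-first search by a depth-first search over an explicit
-- stack with a distance map and re-expansion on improvement (relaxation); objective: alternative.


-- ===== PORT A =====
-- is_wall(pos, key): popcount parity of v (bin(v).count("1") = PySem.Int.bitCount v, exact on negatives)
def isWall (pos : Int × Int) (key : Int) : Bool :=
  PySem.Int.bitCount (pos.1 * pos.1 + 3 * pos.1 + 2 * pos.1 * pos.2 + pos.2 + pos.2 * pos.2 + key) % 2 == 1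

-- neighbours(pos): the four yields, in order, with the same guards
def nbrs (pos : Int × Int) : List (Int × Int) :=
  [(pos.1 + 1, pos.2), (pos.1, pos.2 + 1)]
    ++ (if 0 < pos.1 then [(pos.1 - 1, pos.2)] else [])
    ++ (if 0 < pos.2 then [(pos.1, pos.2 - 1)] else [])

-- body of A's inner 'for n in starts' loop; state = (visited, new_starts)
def lvlStep (key : Int) (acc : PySem.Set (Int × Int) × List (Int × Int)) (n : Int × Int) :
    PySem.Set (Int × Int) × List (Int × Int) :=
  if !(isWall n key) then
    if !(acc.1.contains n) then (acc.1.add n, acc.2 ++ nbrs n) else acc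
  else acc

-- body of A's outer 'for _ in range(moves + 1)' loop: one level, starts := new_starts
def laStep (key : Int) (st : PySem.Set (Int × Int) × List (Int × Int)) :
    PySem.Set (Int × Int) × List (Int × Int) :=
  st.2.foldl (lvlStep key) (st.1, [])

def solve (pos : Int × Int) (moves : Int) (key : Int) : Int :=
  PySem.Set.len
    (((PySem.List.pyRange 0 (moves + 1) 1).foldl (fun st _ => laStep key st)
      (PySem.Set.ofList [], [pos])).1)

-- ===== PORT B =====
-- the list 'for p in neighbours(c): stack.append((p, d + 1))' pushes (top of stack first)
def push (key moves : Int) (c : Int × Int) (d : Int) : List ((Int × Int) × Int) :=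
  if d < moves then ((nbrs c).map (fun p => (p, d + 1))).reverse else []

-- Source B's 'while stack' loop: pop (c, d); skip walls and entries not improving dist; otherwise
-- record dist[c] = d and push the neighbours. Fuel only makes it total (dfsFuel below is proved
-- sufficient in the lemmas); the stack's head is Python's end of list.
def dfs (key moves : Int) : Nat → PySem.Dict (Int × Int) Int → List ((Int × Int) × Int) →
    PySem.Dict (Int × Int) Int
  | 0, dist, _ => dist
  | _ + 1, dist, [] => dist
  | f + 1, dist, (c, d) :: rest =>
    if isWall c key then dfs key moves f dist rest
    else
      match dist.get? c with
      | some e =>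
        if e ≤ d then dfs key moves f dist rest
        else dfs key moves f (dist.insert c d) (push key moves c d ++ rest)
      | none => dfs key moves f (dist.insert c d) (push key moves c d ++ rest)

def dfsFuel (moves : Int) : Nat :=
  5 * ((2 * moves.toNat + 1) * (2 * moves.toNat + 1) * (moves.toNat + 1)) + 1

def solve_alt (pos : Int × Int) (moves : Int) (key : Int) : Int :=
  if moves < 0 then 0
  else ((dfs key moves (dfsFuel moves) PySem.Dict.empty [(pos, 0)]).size : Int)

-- ===== PRECONDITION & SPEC =====
def Spec_solve (pos : Int × Int) (moves : Int) (key : Int) (out : Int) : Prop := out = solve_alt pos moves key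
instance (pos : Int × Int) (moves : Int) (key : Int) (out : Int) : Decidable (Spec_solve pos moves key out) := by unfold Spec_solve; infer_instance

-- ===== CLAIM (what is proved, stated in full; the proofs are below) =====
def Claim_equal_solve : Prop := ∀ (pos : Int × Int) (moves : Int) (key : Int), Dom_solve pos moves key → Spec_solve pos moves key (solve pos moves key)

-- ===== LEMMAS AND PROOFS =====

-- cells reachable from pos through open cells in at most k steps (the common reference set)
def reachF (key : Int) (pos : Int × Int) : Nat → Finset (Int × Int)
  | 0 => if isWall pos key then ∅ else {pos}
  | k + 1 => reachF key pos k ∪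
      (reachF key pos k).biUnion (fun p => ((nbrs p).filter (fun c => !(isWall c key))).toFinset)

theorem mem_reachF_zero (key : Int) (pos x : Int × Int) :
    x ∈ reachF key pos 0 ↔ x = pos ∧ isWall pos key = false := by
  by_cases h : isWall pos key <;> simp [reachF, h]

theorem mem_reachF_succ (key : Int) (pos : Int × Int) (k : Nat) (x : Int × Int) :
    x ∈ reachF key pos (k + 1) ↔
      x ∈ reachF key pos k ∨
        (isWall x key = false ∧ ∃ p ∈ reachF key pos k, x ∈ nbrs p) := by
  simp only [reachF, Finset.mem_union, Finset.mem_biUnion, List.mem_toFinset, List.mem_filter,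
    Bool.not_eq_eq_eq_not, Bool.not_true]
  tauto

theorem reachF_mono (key : Int) (pos : Int × Int) {k l : Nat} (h : k ≤ l) :
    reachF key pos k ⊆ reachF key pos l := by
  induction l with
  | zero => simpa [Nat.le_zero.mp h]
  | succ l ih =>
      rcases Nat.lt_or_ge k (l + 1) with h' | h'
      · exact fun x hx => (mem_reachF_succ key pos l x).mpr (Or.inl (ih (by omega) hx))
      · have : k = l + 1 := by omega
        subst this; exact fun x hx => hx

theorem nbrs_cases {n c : Int × Int} (h : n ∈ nbrs c) :
    n = (c.1 + 1, c.2) ∨ n = (c.1, c.2 + 1) ∨ n = (c.1 - 1, c.2) ∨ n = (c.1, c.2 - 1) := by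
  unfold nbrs at h
  split_ifs at h <;> simp_all <;> tauto

theorem nbrs_length_le (c : Int × Int) : (nbrs c).length ≤ 4 := by
  unfold nbrs; split_ifs <;> simp

-- ---- A side ----

theorem foldl_const_iterate {α β : Type} (g : β → β) :
    ∀ (l : List α) (st : β), l.foldl (fun s _ => g s) st = g^[l.length] st := by
  intro l
  induction l with
  | nil => intro st; rfl
  | cons a t ih =>
      intro st
      simp [List.foldl_cons, ih, Function.iterate_succ_apply]

theorem lvlStep_of_skip {key : Int} {acc : PySem.Set (Int × Int) × List (Int × Int)}
    {n : Int × Int} (h : (isWall n key || acc.1.contains n) = true) :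
    lvlStep key acc n = acc := by
  unfold lvlStep
  rcases Bool.or_eq_true_iff.mp h with h1 | h1 <;> rw [h1] <;> simp

theorem lvlStep_of_visit {key : Int} {acc : PySem.Set (Int × Int) × List (Int × Int)}
    {n : Int × Int} (h : (isWall n key || acc.1.contains n) = false) :
    lvlStep key acc n = (acc.1.add n, acc.2 ++ nbrs n) := by
  unfold lvlStep
  rcases Bool.or_eq_false_iff.mp h with ⟨h1, h2⟩
  rw [h1, h2]
  simp

-- what one inner pass over starts does, as sets: visited gains the open cells of starts,
-- new_starts gains the neighbours of the newly visited cells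
theorem foldA_sets (key : Int) :
    ∀ (S : List (Int × Int)) (V : PySem.Set (Int × Int)) (ns : List (Int × Int)), V.Nodup →
      (S.foldl (lvlStep key) (V, ns)).1.Nodup ∧
      (∀ x, x ∈ (S.foldl (lvlStep key) (V, ns)).1 ↔
        x ∈ V ∨ (x ∈ S ∧ isWall x key = false)) ∧
      (∀ y, y ∈ (S.foldl (lvlStep key) (V, ns)).2 ↔
        y ∈ ns ∨ ∃ c, c ∈ S ∧ isWall c key = false ∧ c ∉ V ∧ y ∈ nbrs c) := by
  intro S
  induction S with
  | nil => intro V ns hV; simp [hV]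
  | cons c S ih =>
      intro V ns hV
      rw [List.foldl_cons]
      by_cases hw : isWall c key = true
      · rw [lvlStep_of_skip (by simp [hw])]
        obtain ⟨h1, h2, h3⟩ := ih V ns hV
        refine ⟨h1, fun x => ?_, fun y => ?_⟩
        · rw [h2]
          constructor
          · rintro (h | ⟨hxS, hxo⟩)
            · exact Or.inl h
            · exact Or.inr ⟨List.mem_cons_of_mem _ hxS, hxo⟩
          · rintro (h | ⟨hxS, hxo⟩)
            · exact Or.inl h
            · rcases List.mem_cons.mp hxS with rfl | hxS
              · rw [hw] at hxo; cases hxo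
              · exact Or.inr ⟨hxS, hxo⟩
        · rw [h3]
          constructor
          · rintro (h | ⟨c', hc', rest⟩)
            · exact Or.inl h
            · exact Or.inr ⟨c', List.mem_cons_of_mem _ hc', rest⟩
          · rintro (h | ⟨c', hc', hco, hcV, hy⟩)
            · exact Or.inl h
            · rcases List.mem_cons.mp hc' with rfl | hc'
              · rw [hw] at hco; cases hco
              · exact Or.inr ⟨c', hc', hco, hcV, hy⟩
      · replace hw : isWall c key = false := by simpa using hw
        by_cases hc : c ∈ V
        · rw [lvlStep_of_skip (by simp [hw, hc])]
          obtain ⟨h1, h2, h3⟩ := ih V ns hV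
          refine ⟨h1, fun x => ?_, fun y => ?_⟩
          · rw [h2]
            constructor
            · rintro (h | ⟨hxS, hxo⟩)
              · exact Or.inl h
              · exact Or.inr ⟨List.mem_cons_of_mem _ hxS, hxo⟩
            · rintro (h | ⟨hxS, hxo⟩)
              · exact Or.inl h
              · rcases List.mem_cons.mp hxS with rfl | hxS
                · exact Or.inl hc
                · exact Or.inr ⟨hxS, hxo⟩
          · rw [h3]
            constructor
            · rintro (h | ⟨c', hc', rest⟩)
              · exact Or.inl h
              · exact Or.inr ⟨c', List.mem_cons_of_mem _ hc', rest⟩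
            · rintro (h | ⟨c', hc', hco, hcV, hy⟩)
              · exact Or.inl h
              · rcases List.mem_cons.mp hc' with rfl | hc'
                · exact absurd hc hcV
                · exact Or.inr ⟨c', hc', hco, hcV, hy⟩
        · rw [lvlStep_of_visit
            (by simp [hw]; simpa using hc)]
          obtain ⟨h1, h2, h3⟩ := ih (V.add c) (ns ++ nbrs c) (PySem.Set.nodup_add V c hV)
          refine ⟨h1, fun x => ?_, fun y => ?_⟩
          · rw [h2, PySem.Set.mem_add]
            constructor
            · rintro ((h | rfl) | ⟨hxS, hxo⟩)
              · exact Or.inl h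
              · exact Or.inr ⟨List.mem_cons_self, hw⟩
              · exact Or.inr ⟨List.mem_cons_of_mem _ hxS, hxo⟩
            · rintro (h | ⟨hxS, hxo⟩)
              · exact Or.inl (Or.inl h)
              · rcases List.mem_cons.mp hxS with rfl | hxS
                · exact Or.inl (Or.inr rfl)
                · exact Or.inr ⟨hxS, hxo⟩
          · rw [h3]
            constructor
            · rintro (h | ⟨c', hc', hco, hcV, hy⟩)
              · rcases List.mem_append.mp h with h | h
                · exact Or.inl h
                · exact Or.inr ⟨c, List.mem_cons_self, hw, hc, h⟩
              · rw [PySem.Set.mem_add] at hcV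
                exact Or.inr ⟨c', List.mem_cons_of_mem _ hc', hco,
                  fun h' => hcV (Or.inl h'), hy⟩
            · rintro (h | ⟨c', hc', hco, hcV, hy⟩)
              · exact Or.inl (List.mem_append.mpr (Or.inl h))
              · rcases List.mem_cons.mp hc' with rfl | hc'
                · exact Or.inl (List.mem_append.mpr (Or.inr hy))
                · by_cases hcc : c' = c
                  · subst hcc; exact Or.inl (List.mem_append.mpr (Or.inr hy))
                  · exact Or.inr ⟨c', hc', hco,
                      by rw [PySem.Set.mem_add]; rintro (h' | h') <;> [exact hcV h'; exact hcc h'], hy⟩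

-- A's state after j outer iterations
def stA (key : Int) (pos : Int × Int) (j : Nat) : PySem.Set (Int × Int) × List (Int × Int) :=
  (laStep key)^[j] (PySem.Set.ofList [], [pos])

theorem stA_succ (key : Int) (pos : Int × Int) (j : Nat) :
    stA key pos (j + 1) = laStep key (stA key pos j) := by
  unfold stA; rw [Function.iterate_succ_apply']

-- the loop invariant of A's outer loop
theorem A_inv (key : Int) (pos : Int × Int) :
    ∀ j : Nat,
      (stA key pos j).1.Nodup ∧
      (∀ x, x ∈ reachF key pos j ↔
        (x ∈ (stA key pos j).1 ∨ (x ∈ (stA key pos j).2 ∧ isWall x key = false))) ∧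
      (∀ c ∈ (stA key pos j).1, ∀ n ∈ nbrs c, isWall n key = false →
        n ∈ (stA key pos j).1 ∨ n ∈ (stA key pos j).2) := by
  intro j
  induction j with
  | zero =>
      refine ⟨by simp [stA, PySem.Set.ofList_nil], fun x => ?_, by simp [stA, PySem.Set.ofList_nil]⟩
      rw [mem_reachF_zero]
      simp only [stA, Function.iterate_zero, id_eq, PySem.Set.ofList_nil]
      constructor
      · rintro ⟨rfl, h⟩; exact Or.inr ⟨List.mem_singleton_self _, h⟩
      · rintro (h | ⟨h1, h2⟩)
        · cases h
        · rcases List.mem_singleton.mp h1 with rfl; exact ⟨rfl, h2⟩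
  | succ j ih =>
      obtain ⟨hN, hE, hC⟩ := ih
      rw [stA_succ]
      unfold laStep
      obtain ⟨h1, h2, h3⟩ := foldA_sets key (stA key pos j).2 (stA key pos j).1 [] hN
      refine ⟨h1, fun x => ?_, fun c hc n hn hno => ?_⟩
      · rw [mem_reachF_succ, h2]
        constructor
        · rintro (h | ⟨hxo, p, hp, hnb⟩)
          · rw [hE] at h
            rcases h with h | ⟨h, ho⟩
            · exact Or.inl (Or.inl h)
            · exact Or.inl (Or.inr ⟨h, ho⟩)
          · rw [hE] at hp
            rcases hp with hp | ⟨hp, hpo⟩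
            · rcases hC p hp x hnb hxo with h | h
              · exact Or.inl (Or.inl h)
              · exact Or.inl (Or.inr ⟨h, hxo⟩)
            · by_cases hpV : p ∈ (stA key pos j).1
              · rcases hC p hpV x hnb hxo with h | h
                · exact Or.inl (Or.inl h)
                · exact Or.inl (Or.inr ⟨h, hxo⟩)
              · refine Or.inr ⟨?_, hxo⟩
                rw [h3]
                exact Or.inr ⟨p, hp, hpo, hpV, hnb⟩
        · rintro (h | ⟨hS, hxo⟩)
          · exact Or.inl ((hE x).mpr h)
          · rw [h3] at hS
            rcases hS with h | ⟨c', hc', hco, hcV, hy⟩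
            · cases h
            · exact Or.inr ⟨hxo, c', (hE c').mpr (Or.inr ⟨hc', hco⟩), hy⟩
      · rw [h2] at hc
        rcases hc with hc | ⟨hcS, hco⟩
        · rcases hC c hc n hn hno with h | h
          · exact Or.inl ((h2 n).mpr (Or.inl h))
          · exact Or.inl ((h2 n).mpr (Or.inr ⟨h, hno⟩))
        · by_cases hcV : c ∈ (stA key pos j).1
          · rcases hC c hcV n hn hno with h | h
            · exact Or.inl ((h2 n).mpr (Or.inl h))
            · exact Or.inl ((h2 n).mpr (Or.inr ⟨h, hno⟩))
          · refine Or.inr ?_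
            rw [h3]
            exact Or.inr ⟨c, hcS, hco, hcV, hn⟩

theorem stA_fst_mem (key : Int) (pos : Int × Int) (j : Nat) (x : Int × Int) :
    x ∈ (stA key pos (j + 1)).1 ↔ x ∈ reachF key pos j := by
  obtain ⟨hN, hE, _⟩ := A_inv key pos j
  rw [stA_succ]
  unfold laStep
  obtain ⟨_, h2, _⟩ := foldA_sets key (stA key pos j).2 (stA key pos j).1 [] hN
  rw [h2, hE]

theorem solveA_card (pos : Int × Int) (moves key : Int) (hm : 0 ≤ moves) :
    solve pos moves key = ((reachF key pos moves.toNat).card : Int) := by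
  unfold solve
  rw [foldl_const_iterate (laStep key), PySem.List.length_pyRange_one]
  have hlen : (moves + 1 - 0).toNat = moves.toNat + 1 := by omega
  rw [hlen]
  have hN := (A_inv key pos (moves.toNat + 1)).1
  have hmem := stA_fst_mem key pos moves.toNat
  have hfin : (stA key pos (moves.toNat + 1)).1.toFinset = reachF key pos moves.toNat := by
    apply Finset.ext
    intro x
    rw [List.mem_toFinset, hmem]
  have hcard : (stA key pos (moves.toNat + 1)).1.length = (reachF key pos moves.toNat).card := by
    rw [← hfin, List.toFinset_card_of_nodup hN]
  show PySem.Set.len (stA key pos (moves.toNat + 1)).1 = _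
  simp [PySem.Set.len, hcard]

-- ---- B side ----

theorem mem_push {key moves : Int} {c : Int × Int} {d : Int} {n : Int × Int} {e : Int} :
    (n, e) ∈ push key moves c d ↔ d < moves ∧ n ∈ nbrs c ∧ e = d + 1 := by
  unfold push
  split_ifs with h
  · simp only [h, List.mem_reverse, List.mem_map, true_and]
    constructor
    · rintro ⟨p, hp, heq⟩
      rw [Prod.mk.injEq] at heq
      exact ⟨heq.1 ▸ hp, heq.2.symm⟩
    · rintro ⟨hn, rfl⟩
      exact ⟨n, hn, rfl⟩
  · simp [h]

theorem push_length_le (key moves : Int) (c : Int × Int) (d : Int) :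
    (push key moves c d).length ≤ 4 := by
  unfold push
  split_ifs
  · simpa using nbrs_length_le c
  · simp

-- stack invariant: entries carry a valid depth, stay in the box around pos, and are sound
def InvS (key : Int) (pos : Int × Int) (moves : Int) (S : List ((Int × Int) × Int)) : Prop :=
  ∀ c d, (c, d) ∈ S → 0 ≤ d ∧ d ≤ moves ∧
    pos.1 - d ≤ c.1 ∧ c.1 ≤ pos.1 + d ∧ pos.2 - d ≤ c.2 ∧ c.2 ≤ pos.2 + d ∧
    (isWall c key = false → c ∈ reachF key pos d.toNat)

-- dict invariant: keys are distinct open reachable cells with valid recorded depths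
def InvD (key : Int) (pos : Int × Int) (moves : Int) (dist : PySem.Dict (Int × Int) Int) : Prop :=
  dist.keys.Nodup ∧ ∀ c v, dist.get? c = some v → 0 ≤ v ∧ v ≤ moves ∧
    pos.1 - v ≤ c.1 ∧ c.1 ≤ pos.1 + v ∧ pos.2 - v ≤ c.2 ∧ c.2 ≤ pos.2 + v ∧
    isWall c key = false ∧ c ∈ reachF key pos v.toNat

-- relaxation invariant: every recorded cell below the bound has each open neighbour either
-- already recorded at ≤ v+1 or pending on the stack at ≤ v+1
def InvFix (key moves : Int) (dist : PySem.Dict (Int × Int) Int)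
    (S : List ((Int × Int) × Int)) : Prop :=
  ∀ c v, dist.get? c = some v → v < moves → ∀ n, n ∈ nbrs c → isWall n key = false →
    (∃ u, dist.get? n = some u ∧ u ≤ v + 1) ∨ (∃ d', (n, d') ∈ S ∧ d' ≤ v + 1)

-- termination potential: remaining improvement over the box
noncomputable def boxF (pos : Int × Int) (moves : Int) : Finset (Int × Int) :=
  Finset.Icc (pos.1 - moves) (pos.1 + moves) ×ˢ Finset.Icc (pos.2 - moves) (pos.2 + moves)

noncomputable def phi (pos : Int × Int) (moves : Int) (dist : PySem.Dict (Int × Int) Int) : Nat :=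
  (boxF pos moves).sum (fun c => (dist.getD c (moves + 1)).toNat)

theorem phi_insert_lt (pos : Int × Int) (moves : Int) (dist : PySem.Dict (Int × Int) Int)
    (c : Int × Int) (d : Int) (hbox : c ∈ boxF pos moves) (hd0 : 0 ≤ d)
    (hlt : d < dist.getD c (moves + 1)) :
    phi pos moves (dist.insert c d) < phi pos moves dist := by
  unfold phi
  apply Finset.sum_lt_sum
  · intro x _
    rw [PySem.Dict.getD_insert]
    split_ifs with h
    · subst h; omega
    · exact le_refl _
  · exact ⟨c, hbox, by rw [PySem.Dict.getD_insert, if_pos rfl]; omega⟩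

-- the main lemma: with sufficient fuel (measured by phi), the DFS run (1) only lowers recorded
-- values, (2) honours every open stack entry, and ends in a state that is (3) a relaxation
-- fixpoint and (4) still satisfies the dict invariant
theorem dfs_main (key : Int) (pos : Int × Int) (moves : Int) :
    ∀ (f : Nat) (dist : PySem.Dict (Int × Int) Int) (S : List ((Int × Int) × Int)),
      InvS key pos moves S → InvD key pos moves dist → InvFix key moves dist S →
      5 * phi pos moves dist + S.length ≤ f →
      (∀ c v, dist.get? c = some v →
        ∃ v', (dfs key moves f dist S).get? c = some v' ∧ v' ≤ v) ∧
      (∀ c d, (c, d) ∈ S → isWall c key = false →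
        ∃ v, (dfs key moves f dist S).get? c = some v ∧ v ≤ d) ∧
      InvFix key moves (dfs key moves f dist S) [] ∧
      InvD key pos moves (dfs key moves f dist S) := by
  intro f
  induction f with
  | zero =>
      intro dist S hS hD hFix hμ
      have hSnil : S = [] := by
        cases S with
        | nil => rfl
        | cons a t => simp [List.length_cons] at hμ
      subst hSnil
      exact ⟨fun c v h => ⟨v, h, le_refl v⟩, by simp, hFix, hD⟩
  | succ f ih =>
      intro dist S hS hD hFix hμ
      cases S with
      | nil =>
          exact ⟨fun c v h => ⟨v, h, le_refl v⟩, by simp, hFix, hD⟩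
      | cons hd rest =>
          obtain ⟨c, d⟩ := hd
          obtain ⟨hd0, hdm, hb1, hb2, hb3, hb4, hsnd⟩ := hS c d List.mem_cons_self
          have hμ' : 5 * phi pos moves dist + rest.length ≤ f := by
            simp only [List.length_cons] at hμ; omega
          have hSr : InvS key pos moves rest := fun c' d' h => hS c' d' (List.mem_cons_of_mem _ h)
          by_cases hw : isWall c key = true
          · -- wall: skip
            have hstep : dfs key moves (f + 1) dist ((c, d) :: rest) = dfs key moves f dist rest := by
              simp [dfs, hw]
            rw [hstep]
            have hFix' : InvFix key moves dist rest := by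
              intro c' v hv hvm n hn hno
              rcases hFix c' v hv hvm n hn hno with h | ⟨d', hd', hle⟩
              · exact Or.inl h
              · rcases List.mem_cons.mp hd' with heq | hd'
                · rw [Prod.mk.injEq] at heq
                  rw [heq.1] at hno; rw [hno] at hw; cases hw
                · exact Or.inr ⟨d', hd', hle⟩
            obtain ⟨P1, P2, P3, P4⟩ := ih dist rest hSr hD hFix' hμ'
            refine ⟨P1, fun c' d' hmem hopen => ?_, P3, P4⟩
            rcases List.mem_cons.mp hmem with heq | hmem
            · rw [Prod.mk.injEq] at heq
              rw [heq.1] at hopen; rw [hopen] at hw; cases hw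
            · exact P2 c' d' hmem hopen
          · replace hw : isWall c key = false := by simpa using hw
            by_cases hskip : ∃ e, dist.get? c = some e ∧ e ≤ d
            · -- recorded at ≤ d: skip
              obtain ⟨e, hget, hle⟩ := hskip
              have hstep : dfs key moves (f + 1) dist ((c, d) :: rest) =
                  dfs key moves f dist rest := by
                simp [dfs, hw, hget, hle]
              rw [hstep]
              have hFix' : InvFix key moves dist rest := by
                intro c' v hv hvm n hn hno
                rcases hFix c' v hv hvm n hn hno with h | ⟨d', hd', hdle⟩
                · exact Or.inl h
                · rcases List.mem_cons.mp hd' with heq | hd'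
                  · rw [Prod.mk.injEq] at heq
                    refine Or.inl ⟨e, ?_, by omega⟩
                    rw [heq.1]; exact hget
                  · exact Or.inr ⟨d', hd', hdle⟩
              obtain ⟨P1, P2, P3, P4⟩ := ih dist rest hSr hD hFix' hμ'
              refine ⟨P1, fun c' d' hmem hopen => ?_, P3, P4⟩
              rcases List.mem_cons.mp hmem with heq | hmem
              · rw [Prod.mk.injEq] at heq
                obtain ⟨v', hv', hv'le⟩ := P1 c e hget
                exact ⟨v', by rw [heq.1]; exact hv', by omega⟩
              · exact P2 c' d' hmem hopen
            · -- improvement: record dist[c] = d and push neighbours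
              have hgt : ∀ u, dist.get? c = some u → d < u := by
                intro u hu
                by_contra h
                exact hskip ⟨u, hu, by omega⟩
              have hstep : dfs key moves (f + 1) dist ((c, d) :: rest) =
                  dfs key moves f (dist.insert c d) (push key moves c d ++ rest) := by
                rcases h : dist.get? c with _ | e
                · simp [dfs, hw, h]
                · have hde := hgt e h
                  simp only [dfs, hw, Bool.false_eq_true, if_false, h]
                  rw [if_neg (by omega)]
              rw [hstep]
              -- invariants for the recursive call
              have hS' : InvS key pos moves (push key moves c d ++ rest) := by
                intro c' d' hmem
                rcases List.mem_append.mp hmem with hmem | hmem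
                · obtain ⟨hdm', hnb, rfl⟩ := mem_push.mp hmem
                  have hco := nbrs_cases hnb
                  refine ⟨by omega, by omega, ?_, ?_, ?_, ?_, ?_⟩
                  · rcases hco with h | h | h | h <;> rw [h] <;> simp <;> omega
                  · rcases hco with h | h | h | h <;> rw [h] <;> simp <;> omega
                  · rcases hco with h | h | h | h <;> rw [h] <;> simp <;> omega
                  · rcases hco with h | h | h | h <;> rw [h] <;> simp <;> omega
                  · intro hopen
                    have hcr : c ∈ reachF key pos d.toNat := hsnd hw
                    have ht : (d + 1).toNat = d.toNat + 1 := by omega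
                    rw [ht, mem_reachF_succ]
                    exact Or.inr ⟨hopen, c, hcr, hnb⟩
                · exact hSr c' d' hmem
              have hD' : InvD key pos moves (dist.insert c d) := by
                refine ⟨PySem.Dict.nodup_keys_insert dist c d hD.1, ?_⟩
                intro c' v hv
                rw [PySem.Dict.get?_insert] at hv
                split_ifs at hv with h
                · subst h
                  injection hv with hv
                  subst hv
                  exact ⟨hd0, hdm, hb1, hb2, hb3, hb4, hw, hsnd hw⟩
                · exact hD.2 c' v hv
              have hFix' : InvFix key moves (dist.insert c d) (push key moves c d ++ rest) := by
                intro c' v hv hvm n hn hno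
                rw [PySem.Dict.get?_insert] at hv
                split_ifs at hv with hc'
                · subst hc'
                  injection hv with hv
                  subst hv
                  exact Or.inr ⟨d + 1, List.mem_append.mpr (Or.inl (mem_push.mpr ⟨hvm, hn, rfl⟩)),
                    le_refl _⟩
                · rcases hFix c' v hv hvm n hn hno with ⟨u, hu, hule⟩ | ⟨d', hd', hdle⟩
                  · by_cases hnc : n = c
                    · subst hnc
                      have := hgt u hu
                      exact Or.inl ⟨d, by rw [PySem.Dict.get?_insert, if_pos rfl], by omega⟩
                    · exact Or.inl ⟨u, by rw [PySem.Dict.get?_insert, if_neg hnc]; exact hu, hule⟩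
                  · rcases List.mem_cons.mp hd' with heq | hd'
                    · rw [Prod.mk.injEq] at heq
                      refine Or.inl ⟨d, ?_, by omega⟩
                      rw [heq.1, PySem.Dict.get?_insert, if_pos rfl]
                    · exact Or.inr ⟨d', List.mem_append.mpr (Or.inr hd'), hdle⟩
              have hφ : phi pos moves (dist.insert c d) < phi pos moves dist := by
                apply phi_insert_lt pos moves dist c d
                · unfold boxF
                  rw [Finset.mem_product, Finset.mem_Icc, Finset.mem_Icc]
                  constructor <;> constructor <;> omega
                · exact hd0
                · rcases h : dist.get? c with _ | e
                  · rw [PySem.Dict.getD_eq_get?_getD, h]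
                    simp; omega
                  · rw [PySem.Dict.getD_eq_get?_getD, h]
                    simpa using hgt e h
              have hμ'' : 5 * phi pos moves (dist.insert c d) +
                  (push key moves c d ++ rest).length ≤ f := by
                have hp := push_length_le key moves c d
                rw [List.length_append]
                omega
              obtain ⟨P1, P2, P3, P4⟩ := ih (dist.insert c d) (push key moves c d ++ rest)
                hS' hD' hFix' hμ''
              refine ⟨fun c' v hv => ?_, fun c' d' hmem hopen => ?_, P3, P4⟩
              · by_cases hc' : c' = c
                · rw [hc'] at hv ⊢
                  have hdv := hgt v hv
                  obtain ⟨v', hv', hv'le⟩ := P1 c d (by rw [PySem.Dict.get?_insert, if_pos rfl])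
                  exact ⟨v', hv', by omega⟩
                · exact P1 c' v (by rw [PySem.Dict.get?_insert, if_neg hc']; exact hv)
              · rcases List.mem_cons.mp hmem with heq | hmem
                · rw [Prod.mk.injEq] at heq
                  obtain ⟨v', hv', hv'le⟩ := P1 c d (by rw [PySem.Dict.get?_insert, if_pos rfl])
                  exact ⟨v', by rw [heq.1]; exact hv', by omega⟩
                · exact P2 c' d' (List.mem_append.mpr (Or.inr hmem)) hopen

-- the initial measure equals dfsFuel
theorem phi_empty (pos : Int × Int) (moves : Int) (hm : 0 ≤ moves) :
    phi pos moves PySem.Dict.empty =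
      (2 * moves.toNat + 1) * (2 * moves.toNat + 1) * (moves.toNat + 1) := by
  unfold phi
  have h1 : ∀ c ∈ boxF pos moves, (PySem.Dict.empty.getD c (moves + 1)).toNat = moves.toNat + 1 := by
    intro c _
    rw [PySem.Dict.getD_empty]
    omega
  rw [Finset.sum_congr rfl h1, Finset.sum_const]
  unfold boxF
  rw [Finset.card_product, Int.card_Icc, Int.card_Icc]
  have : (pos.1 + moves + 1 - (pos.1 - moves)).toNat = 2 * moves.toNat + 1 := by omega
  rw [this]
  have : (pos.2 + moves + 1 - (pos.2 - moves)).toNat = 2 * moves.toNat + 1 := by omega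
  rw [this, smul_eq_mul]

theorem solveB_card (pos : Int × Int) (moves key : Int) (hm : 0 ≤ moves) :
    ((dfs key moves (dfsFuel moves) PySem.Dict.empty [(pos, 0)]).size : Int) =
      ((reachF key pos moves.toNat).card : Int) := by
  have hS0 : InvS key pos moves [(pos, 0)] := by
    intro c d hmem
    rcases List.mem_singleton.mp hmem with heq
    rw [Prod.mk.injEq] at heq
    obtain ⟨rfl, rfl⟩ := heq
    refine ⟨le_refl 0, hm, by omega, by omega, by omega, by omega, fun hopen => ?_⟩
    rw [Int.toNat_zero, mem_reachF_zero]
    exact ⟨rfl, hopen⟩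
  have hD0 : InvD key pos moves PySem.Dict.empty := by
    refine ⟨PySem.Dict.nodup_keys_empty, ?_⟩
    intro c v h
    rw [PySem.Dict.get?_empty] at h
    cases h
  have hFix0 : InvFix key moves PySem.Dict.empty [(pos, 0)] := by
    intro c v h
    rw [PySem.Dict.get?_empty] at h
    cases h
  have hμ0 : 5 * phi pos moves PySem.Dict.empty + [(pos, 0)].length ≤ dfsFuel moves := by
    rw [phi_empty pos moves hm]
    unfold dfsFuel
    simp
  obtain ⟨P1, P2, P3, P4⟩ := dfs_main key pos moves (dfsFuel moves)
    PySem.Dict.empty [(pos, 0)] hS0 hD0 hFix0 hμ0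
  set F := dfs key moves (dfsFuel moves) PySem.Dict.empty [(pos, 0)] with hF
  -- completeness: every reachable cell within k ≤ moves is recorded with value ≤ k
  have comp : ∀ k : Nat, (k : Int) ≤ moves → ∀ c ∈ reachF key pos k,
      ∃ v, F.get? c = some v ∧ v ≤ (k : Int) := by
    intro k
    induction k with
    | zero =>
        intro _ c hc
        rw [mem_reachF_zero] at hc
        obtain ⟨rfl, hop⟩ := hc
        exact P2 c 0 List.mem_cons_self hop
    | succ k ihk =>
        intro hk c hc
        rw [mem_reachF_succ] at hc
        rcases hc with hc | ⟨hop, p, hp, hnb⟩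
        · obtain ⟨v, hv, hvle⟩ := ihk (by push_cast at hk ⊢; omega) c hc
          exact ⟨v, hv, by push_cast; omega⟩
        · obtain ⟨v, hv, hvle⟩ := ihk (by push_cast at hk ⊢; omega) p hp
          have hvm : v < moves := by push_cast at hk hvle; omega
          rcases P3 p v hv hvm c hnb hop with ⟨u, hu, hule⟩ | ⟨d', hd', _⟩
          · exact ⟨u, hu, by push_cast; omega⟩
          · cases hd'
  -- soundness + completeness: keys of F are exactly reachF moves.toNat
  have hkeys : ∀ x, x ∈ F.keys ↔ x ∈ reachF key pos moves.toNat := by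
    intro x
    constructor
    · intro hx
      rcases h : F.get? x with _ | v
      · exact absurd ((PySem.Dict.get?_eq_none_iff_not_mem_keys F x).mp h) (by simp [hx])
      · obtain ⟨_, hvm, _, _, _, _, _, hr⟩ := P4.2 x v h
        exact reachF_mono key pos (by omega) hr
    · intro hx
      obtain ⟨v, hv, _⟩ := comp moves.toNat (by omega) x hx
      by_contra hk
      rw [← PySem.Dict.get?_eq_none_iff_not_mem_keys] at hk
      rw [hk] at hv
      cases hv
  have hnd : F.keys.Nodup := P4.1
  have hfin : F.keys.toFinset = reachF key pos moves.toNat := by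
    apply Finset.ext
    intro x
    rw [List.mem_toFinset, hkeys]
  have hlen : F.keys.length = (reachF key pos moves.toNat).card := by
    rw [← hfin, List.toFinset_card_of_nodup hnd]
  have hsize : F.size = F.keys.length := by
    show F.items.length = (F.items.map Prod.fst).length
    rw [List.length_map]
  rw [hsize, hlen]

-- ===== VERDICT (by name: the statement is the Claim_ definition above) =====
theorem solve_spec : Claim_equal_solve := by
  intro pos moves key _
  unfold Spec_solve
  by_cases hm : moves < 0
  · unfold solve solve_alt
    rw [PySem.List.pyRange_one_eq_nil (by omega)]
    simp [hm, PySem.Set.ofList, PySem.Set.len]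
  · rw [not_lt] at hm
    rw [solveA_card pos moves key hm]
    unfold solve_alt
    rw [if_neg (by omega), solveB_card pos moves key hm]
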